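-- pv_equiv track=rewrite | github.com/kartikayakul01/Solshpherebackend | app.py | _process_report_checks
-- ===== SOURCE A (Python) =====
-- from typing import List, Optional, Dict, Any, Callable
--
-- def _process_report_checks(checks: Dict[str, Any]) -> tuple[List[str], str]:
--     """Process report checks to extract issues and determine overall status.
--
--     Returns:
--         tuple: (list_of_issues, overall_status)
--     """
--     if not isinstance(checks, dict):
--         return [], "OK"
--
--     issues = []
--     has_error = False
--     has_warning = False
--
--     for check_name, check_data in checks.items():
--
--         if check_name == 'overall_status':
--             continue
--
--         if not isinstance(check_data, dict):
--             continue
--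
--         check_status = check_data.get('status', '').lower()
--         if check_status == 'issue':
--             has_error = True
--             issues.append(check_name)
--         elif check_status == 'unknown':
--             has_warning = True
--             issues.append(check_name)
--
--     # Determine overall status
--     if has_error:
--         status = "error"
--     elif has_warning:
--         status = "warning"
--     else:
--         status = "OK"
--
--     return issues, status
-- ===== SOURCE B (Python) =====
-- def _process_report_checks(checks):
--     """Process report checks: collect (name, normalized status) pairs, then derive."""
--     if not isinstance(checks, dict):
--         return [], "OK"
--     pairs = [(name, data.get('status', '').lower())
--              for name, data in checks.items()
--              if name != 'overall_status' and isinstance(data, dict)]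
--     issues = [name for name, s in pairs if s in ('issue', 'unknown')]
--     statuses = [s for _, s in pairs]
--     if 'issue' in statuses:
--         status = "error"
--     elif 'unknown' in statuses:
--         status = "warning"
--     else:
--         status = "OK"
--     return issues, status
-- ===== Notes on version B (the rewrite author's own statement) =====
-- stated objective: simpler
-- what changed: B replaces the two threaded boolean accumulators with a single comprehension collecting (name, lowercased status) pairs, deriving the issues list and overall status post hoc from that collection.
import Mathlib
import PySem

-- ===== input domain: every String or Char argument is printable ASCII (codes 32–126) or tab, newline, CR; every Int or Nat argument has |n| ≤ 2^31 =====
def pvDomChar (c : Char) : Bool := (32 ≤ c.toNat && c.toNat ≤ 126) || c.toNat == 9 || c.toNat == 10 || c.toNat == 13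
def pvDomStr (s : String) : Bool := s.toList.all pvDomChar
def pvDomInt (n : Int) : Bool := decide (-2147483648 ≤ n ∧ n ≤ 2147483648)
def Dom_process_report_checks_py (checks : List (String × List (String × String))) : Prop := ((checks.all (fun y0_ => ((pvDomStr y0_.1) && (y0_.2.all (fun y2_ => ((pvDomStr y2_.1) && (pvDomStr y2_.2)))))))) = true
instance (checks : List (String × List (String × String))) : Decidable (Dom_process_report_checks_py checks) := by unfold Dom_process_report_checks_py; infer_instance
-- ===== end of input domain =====

-- B replaces A's two threaded boolean accumulators with one pass collecting (name, lowered status) pairs and a post-hoc derivation of issues and overall status (objective: simpler).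


-- check_data.get('status', '').lower() on an association-list dict (first match = Python dict lookup)
def pvStatusOf (d : List (String × String)) : String :=
  PySem.Str.lower (((d.find? (fun p => p.1 == "status")).map Prod.snd).getD "")

-- ===== PORT A =====
-- the loop body: threaded state (issues, has_error, has_warning)
def pvStepA (acc : List String × Bool × Bool) (c : String × List (String × String)) :
    List String × Bool × Bool :=
  if c.1 == "overall_status" then acc
  else
    let st := pvStatusOf c.2
    if st == "issue" then (acc.1 ++ [c.1], true, acc.2.2)
    else if st == "unknown" then (acc.1 ++ [c.1], acc.2.1, true)
    else acc

def process_report_checks_py (checks : List (String × List (String × String))) : List String × String :=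
  let r := checks.foldl pvStepA ([], false, false)
  (r.1, if r.2.1 then "error" else if r.2.2 then "warning" else "OK")

-- ===== PORT B =====
def pvPairsB (checks : List (String × List (String × String))) : List (String × String) :=
  (checks.filter (fun c => c.1 != "overall_status")).map (fun c => (c.1, pvStatusOf c.2))

def process_report_checks_py_alt (checks : List (String × List (String × String))) : List String × String :=
  let pairs := pvPairsB checks
  let issues := (pairs.filter (fun p => p.2 == "issue" || p.2 == "unknown")).map Prod.fst
  let statuses := pairs.map Prod.snd
  let status := if statuses.contains "issue" then "error"
                else if statuses.contains "unknown" then "warning" else "OK"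
  (issues, status)

-- ===== PRECONDITION & SPEC =====
def Spec_process_report_checks_py (checks : List (String × List (String × String))) (out : List String × String) : Prop := out = process_report_checks_py_alt checks
instance (checks : List (String × List (String × String))) (out : List String × String) : Decidable (Spec_process_report_checks_py checks out) := by unfold Spec_process_report_checks_py; infer_instance

-- ===== CLAIM (what is proved, stated in full; the proofs are below) =====
def Claim_equal_process_report_checks_py : Prop := ∀ (checks : List (String × List (String × String))), Dom_process_report_checks_py checks → Spec_process_report_checks_py checks (process_report_checks_py checks)

-- ===== LEMMAS AND PROOFS =====

-- invariant of A's fold: the accumulator is extended by B's derived quantities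
theorem pvFoldA_eq (l : List (String × List (String × String)))
    (is : List String) (he hw : Bool) :
    l.foldl pvStepA (is, he, hw) =
      (is ++ ((pvPairsB l).filter (fun p => p.2 == "issue" || p.2 == "unknown")).map Prod.fst,
       he || ((pvPairsB l).map Prod.snd).contains "issue",
       hw || ((pvPairsB l).map Prod.snd).contains "unknown") := by
  induction l generalizing is he hw with
  | nil => simp [pvPairsB]
  | cons c t ih =>
    by_cases hov : c.1 = "overall_status"
    · simp [List.foldl_cons, pvStepA, hov, ih, pvPairsB]
    · by_cases hi : pvStatusOf c.2 = "issue"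
      · simp [List.foldl_cons, pvStepA, hov, hi, ih, pvPairsB]
      · by_cases hu : pvStatusOf c.2 = "unknown"
        · simp [List.foldl_cons, pvStepA, hov, hu, ih, pvPairsB]
        · have hi' : ("issue" == pvStatusOf c.2) = false := by simp [Ne.symm hi]
          have hu' : ("unknown" == pvStatusOf c.2) = false := by simp [Ne.symm hu]
          simp [List.foldl_cons, pvStepA, hov, hi, hu, hi', hu', ih, pvPairsB]

-- ===== VERDICT (by name: the statement is the Claim_ definition above) =====
theorem process_report_checks_py_spec : Claim_equal_process_report_checks_py := by
  intro checks _
  unfold Spec_process_report_checks_py process_report_checks_py process_report_checks_py_alt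
  rw [pvFoldA_eq]
  simp only [Bool.false_or, List.nil_append]
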